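-- pv_equiv track=rewrite | github.com/abywaves/Spring22PythonProject | celtic/parser/builder.py | build_global_count_index
-- ===== SOURCE A (Python) =====
-- def build_global_count_index(data):
--     temp_dictionary = {}
--     for document, words_list in data.items():
--         for word in words_list:
--             if word in temp_dictionary:
--                 temp_dictionary[word] += 1
--             else:
--                 temp_dictionary[word] = 1
--     return temp_dictionary
-- ===== SOURCE B (Python) =====
-- def build_global_count_index(data):
--     words = [w for ws in data.values() for w in ws]
--     return {w: words.count(w) for w in dict.fromkeys(words)}
-- ===== Notes on version B (the rewrite author's own statement) =====
-- stated objective: simpler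
-- what changed: Replaces the incremental contains/then-increment counting loop by flattening all words once and building the result as a dict comprehension over the ordered-deduplicated words, pairing each distinct word with its total count; first-occurrence order matches A's insertion order.
import Mathlib
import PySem

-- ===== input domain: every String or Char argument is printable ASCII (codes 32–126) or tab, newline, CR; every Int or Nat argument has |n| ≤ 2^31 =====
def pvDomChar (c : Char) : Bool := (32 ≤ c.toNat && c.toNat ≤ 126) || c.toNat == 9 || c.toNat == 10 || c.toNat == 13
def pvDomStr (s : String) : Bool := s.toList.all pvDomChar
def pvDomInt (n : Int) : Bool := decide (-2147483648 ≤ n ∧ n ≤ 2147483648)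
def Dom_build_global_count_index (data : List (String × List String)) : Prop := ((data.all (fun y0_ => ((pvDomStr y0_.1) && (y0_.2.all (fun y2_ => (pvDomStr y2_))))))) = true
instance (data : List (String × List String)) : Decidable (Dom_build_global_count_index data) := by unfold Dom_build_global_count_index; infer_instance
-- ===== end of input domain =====

-- B flattens all words once and builds the result by a dict comprehension over the
-- ordered-deduplicated words with a total count per word (simpler decomposition, not faster).

-- ===== PORT A =====
def build_global_count_index (data : List (String × List String)) : List (String × Int) :=
  (data.foldl
    (fun temp p =>
      p.2.foldl
        (fun temp word =>
          if temp.contains word then temp.insert word (temp.getD word 0 + 1)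
          else temp.insert word 1)
        temp)
    PySem.Dict.empty).items

-- ===== PORT B =====
def build_global_count_index_alt (data : List (String × List String)) : List (String × Int) :=
  let words := data.flatMap (·.2)
  ((PySem.List.dedup words).foldl
    (fun d w => d.insert w ((words.count w : Int)))
    PySem.Dict.empty).items

-- ===== PRECONDITION & SPEC =====
def Spec_build_global_count_index (data : List (String × List String)) (out : List (String × Int)) : Prop := out = build_global_count_index_alt data
instance (data : List (String × List String)) (out : List (String × Int)) : Decidable (Spec_build_global_count_index data out) := by unfold Spec_build_global_count_index; infer_instance

-- ===== CLAIM (what is proved, stated in full; the proofs are below) =====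
def Claim_equal_build_global_count_index : Prop := ∀ (data : List (String × List String)), Dom_build_global_count_index data → Spec_build_global_count_index data (build_global_count_index data)

-- ===== LEMMAS AND PROOFS =====

-- a fold over the pairs that folds each pair's word list equals a fold over the flattened words
theorem foldl_pairs_eq_foldl_flatMap {α : Type} (f : PySem.Dict String Int → α → PySem.Dict String Int)
    (data : List (String × List α)) (d : PySem.Dict String Int) :
    data.foldl (fun temp p => p.2.foldl f temp) d = (data.flatMap (·.2)).foldl f d := by
  induction data generalizing d with
  | nil => rfl
  | cons p t ih => simp [List.foldl_append, ih]

-- A's conditional body is the unconditional counter step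
theorem body_eq_counter_step (d : PySem.Dict String Int) (w : String) :
    (if d.contains w then d.insert w (d.getD w 0 + 1) else d.insert w 1)
      = d.insert w (d.getD w 0 + 1) := by
  by_cases h : d.contains w = true
  · simp [h]
  · have h0 : d.getD w 0 = 0 :=
      PySem.Dict.getD_of_not_contains d 0 (by simp [h])
    simp [h, h0]

-- both ports, in closed form: distinct words in first-occurrence order, paired with their count
theorem a_eq_closed (data : List (String × List String)) :
    build_global_count_index data
      = (PySem.Set.ofList (data.flatMap (·.2))).map
          (fun k => (k, ((data.flatMap (·.2)).count k : Int))) := by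
  unfold build_global_count_index
  rw [foldl_pairs_eq_foldl_flatMap]
  have hfun : (fun (temp : PySem.Dict String Int) (word : String) =>
      if temp.contains word then temp.insert word (temp.getD word 0 + 1)
      else temp.insert word 1)
      = fun d w => d.insert w (d.getD w 0 + 1) :=
    funext fun d => funext fun w => body_eq_counter_step d w
  rw [hfun, PySem.Dict.foldl_insert_getD_add_one_eq_counter, PySem.Dict.items_counter]

theorem b_eq_closed (data : List (String × List String)) :
    build_global_count_index_alt data
      = (PySem.Set.ofList (data.flatMap (·.2))).map
          (fun k => (k, ((data.flatMap (·.2)).count k : Int))) := by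
  unfold build_global_count_index_alt
  rw [PySem.Dict.items_foldl_insert_fresh _ _ _ _
    (fun a _ => PySem.Dict.contains_empty a)
    (by simpa using PySem.List.nodup_dedup (data.flatMap (·.2)))]
  simp [PySem.List.dedup_eq_ofList, PySem.Dict.empty]

-- ===== VERDICT (by name: the statement is the Claim_ definition above) =====
theorem build_global_count_index_spec : Claim_equal_build_global_count_index := by
  intro data _
  unfold Spec_build_global_count_index
  rw [a_eq_closed, b_eq_closed]
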